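-- pv_equiv track=rewrite | github.com/RuoLi7X5/Rodoku | rodoku_api/solver_core.py | fmt_elims
-- ===== SOURCE A (Python) =====
-- from typing import Any, Callable, Dict, Iterable, List, Optional, Tuple
--
-- def fmt_elims(pairs: Iterable[Tuple[int, Optional[int]]]) -> str:
--     """
--     输出紧凑删数格式：r7c4<>16 r2c3<>8
--     - 自动按单元格合并多个数字
--     - 数字升序去重
--     """
--     by_cell: Dict[Tuple[int, int], set[int]] = {}
--     for idx, d in pairs:
--         if d is None:
--             continue
--         r0 = (int(idx) // 9) + 1
--         c0 = (int(idx) % 9) + 1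
--         by_cell.setdefault((r0, c0), set()).add(int(d))
--     parts: List[str] = []
--     for (r0, c0), ds in sorted(by_cell.items(), key=lambda x: (x[0][0], x[0][1])):
--         ds_str = "".join(str(x) for x in sorted(ds))
--         parts.append(f"r{r0}c{c0}<>{ds_str}")
--     return " ".join(parts) if parts else ""
-- ===== SOURCE B (Python) =====
-- def fmt_elims(pairs):
--     # one global sort of the distinct (index, digit) points, then a single
--     # linear grouping pass (the cell r/c is determined by the index).
--     pts = sorted({(int(i), int(d)) for i, d in pairs if d is not None})
--     parts = []
--     k, n = 0, len(pts)
--     while k < n: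
--         i = pts[k][0]
--         ds = ""
--         while k < n and pts[k][0] == i:
--             ds += str(pts[k][1])
--             k += 1
--         parts.append(f"r{i // 9 + 1}c{i % 9 + 1}<>{ds}")
--     return " ".join(parts)
-- ===== Notes on version B (the rewrite author's own statement) =====
-- stated objective: alternative
-- what changed: Replaces A's dict-of-sets accumulation plus a per-cell sort with building the distinct (index, digit) point set, one global lexicographic sort, and a single linear grouping pass that emits each cell's digit string directly (the cell's r/c are recovered from the index).
import Mathlib
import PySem

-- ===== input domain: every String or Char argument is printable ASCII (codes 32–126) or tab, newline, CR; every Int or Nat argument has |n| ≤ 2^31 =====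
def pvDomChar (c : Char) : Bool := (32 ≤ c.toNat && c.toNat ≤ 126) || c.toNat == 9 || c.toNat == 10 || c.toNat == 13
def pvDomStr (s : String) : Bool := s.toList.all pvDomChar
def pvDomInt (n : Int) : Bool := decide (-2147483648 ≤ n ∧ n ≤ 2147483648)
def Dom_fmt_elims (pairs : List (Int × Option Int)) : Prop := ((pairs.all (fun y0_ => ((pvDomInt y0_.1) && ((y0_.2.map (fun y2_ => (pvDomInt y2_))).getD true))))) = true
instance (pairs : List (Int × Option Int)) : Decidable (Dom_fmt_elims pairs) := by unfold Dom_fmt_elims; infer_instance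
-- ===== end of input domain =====

-- B replaces A's dict-of-sets accumulation + per-cell digit sort by one global sort of the
-- distinct (index, digit) points followed by a single linear grouping pass (alternative decomposition).

-- ===== PORT A =====
def fmt_elims (pairs : List (Int × Option Int)) : String :=
  let by_cell : PySem.Dict (Int × Int) (PySem.Set Int) :=
    pairs.foldl (fun d p =>
      match p.2 with
      | none => d
      | some dv =>
        d.modify (PySem.Int.floordiv p.1 9 + 1, PySem.Int.mod p.1 9 + 1)
          PySem.Set.empty (fun s => PySem.Set.add s dv)) PySem.Dict.empty
  let parts : List String :=
    (PySem.List.sorted2 by_cell.items (fun x => x.1.1) (fun x => x.1.2)).map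
      (fun it =>
        let ds_str := PySem.Str.join "" ((PySem.List.sorted it.2 (fun x => x)).map PySem.Int.toStr)
        "r" ++ PySem.Int.toStr it.1.1 ++ "c" ++ PySem.Int.toStr it.1.2 ++ "<>" ++ ds_str)
  if parts = [] then "" else PySem.Str.join " " parts

-- ===== PORT B =====
-- Source B's outer while loop: each step consumes the run of points sharing the leading index
-- (the `ds += str(...)` inner loop is the foldl over the run's digit strings)
def altGroup : List (Int × Int) → List String
  | [] => []
  | (i, d) :: t =>
    let ds := (PySem.Int.toStr d) :: (t.takeWhile (fun q => q.1 == i)).map (fun q => PySem.Int.toStr q.2)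
    ("r" ++ PySem.Int.toStr (PySem.Int.floordiv i 9 + 1) ++ "c" ++ PySem.Int.toStr (PySem.Int.mod i 9 + 1)
      ++ "<>" ++ ds.foldl (· ++ ·) "") :: altGroup (t.dropWhile (fun q => q.1 == i))
  termination_by l => l.length
  decreasing_by simpa using Nat.lt_succ_of_le (t.length_dropWhile_le _)

def fmt_elims_alt (pairs : List (Int × Option Int)) : String :=
  let pts := PySem.List.sorted2
    (PySem.Set.ofList (pairs.filterMap (fun p => p.2.map (fun d => (p.1, d)))))
    (fun q => q.1) (fun q => q.2)
  PySem.Str.join " " (altGroup pts)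

-- ===== PRECONDITION & SPEC =====
def Spec_fmt_elims (pairs : List (Int × Option Int)) (out : String) : Prop := out = fmt_elims_alt pairs
instance (pairs : List (Int × Option Int)) (out : String) : Decidable (Spec_fmt_elims pairs out) := by unfold Spec_fmt_elims; infer_instance

-- ===== CLAIM (what is proved, stated in full; the proofs are below) =====
def Claim_equal_fmt_elims : Prop := ∀ (pairs : List (Int × Option Int)), Dom_fmt_elims pairs → Spec_fmt_elims pairs (fmt_elims pairs)

-- ===== LEMMAS AND PROOFS =====

-- proof-side abbreviations
def pvPts (pairs : List (Int × Option Int)) : List (Int × Int) :=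
  pairs.filterMap (fun p => p.2.map (fun d => (p.1, d)))

def pvKey (i : Int) : Int × Int := (PySem.Int.floordiv i 9 + 1, PySem.Int.mod i 9 + 1)

def pvStep (d : PySem.Dict (Int × Int) (PySem.Set Int)) (q : Int × Int) :
    PySem.Dict (Int × Int) (PySem.Set Int) :=
  d.modify (pvKey q.1) PySem.Set.empty (fun s => PySem.Set.add s q.2)

def pvL (pairs : List (Int × Option Int)) : List (Int × Int) :=
  PySem.List.sorted2 (PySem.Set.ofList (pvPts pairs)) (fun q => q.1) (fun q => q.2)

def pvRender (i : Int) (ds : List Int) : String :=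
  "r" ++ PySem.Int.toStr (PySem.Int.floordiv i 9 + 1) ++ "c" ++ PySem.Int.toStr (PySem.Int.mod i 9 + 1)
    ++ "<>" ++ (ds.map PySem.Int.toStr).foldl (· ++ ·) ""

def pvFirsts : List (Int × Int) → List Int
  | [] => []
  | (i, _) :: t => i :: pvFirsts (t.dropWhile (fun q => q.1 == i))
  termination_by l => l.length
  decreasing_by simpa using Nat.lt_succ_of_le (t.length_dropWhile_le _)

-- A's loop over `pairs` is the same fold over the flattened point list
lemma pv_fold_eq (pairs : List (Int × Option Int)) :
    pairs.foldl (fun d p =>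
      match p.2 with
      | none => d
      | some dv =>
        d.modify (PySem.Int.floordiv p.1 9 + 1, PySem.Int.mod p.1 9 + 1)
          PySem.Set.empty (fun s => PySem.Set.add s dv)) PySem.Dict.empty
    = (pvPts pairs).foldl pvStep PySem.Dict.empty := by
  rw [pvPts, List.foldl_filterMap]
  apply PySem.List.foldl_congr_mem
  intro acc x _
  rcases x with ⟨i, d⟩
  cases d <;> simp [pvStep, pvKey]

-- value of A's dict at a key, in closed form
lemma pv_getD_fold (l : List (Int × Int)) (d : PySem.Dict (Int × Int) (PySem.Set Int)) (k : Int × Int) :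
    ((l.foldl pvStep d).getD k PySem.Set.empty)
    = PySem.Set.update (d.getD k PySem.Set.empty) ((l.filter (fun q => pvKey q.1 == k)).map (·.2)) := by
  induction l generalizing d with
  | nil => simp [PySem.Set.update]
  | cons x t ih =>
    simp only [List.foldl_cons, ih, List.filter_cons]
    by_cases h : pvKey x.1 = k
    · simp only [pvStep, h, beq_self_eq_true, if_pos]
      rw [PySem.Dict.getD_modify]
      simp [PySem.Set.update]
    · have hb : (pvKey x.1 == k) = false := by simp [h]
      simp only [pvStep, hb, Bool.false_eq_true, if_neg, not_false_iff]
      rw [PySem.Dict.getD_modify]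
      simp [Ne.symm h]

lemma pv_getD (pairs : List (Int × Option Int)) (k : Int × Int) :
    (((pvPts pairs).foldl pvStep PySem.Dict.empty).getD k PySem.Set.empty)
    = PySem.Set.ofList (((pvPts pairs).filter (fun q => pvKey q.1 == k)).map (·.2)) := by
  rw [pv_getD_fold]
  rfl

lemma pv_keys (pairs : List (Int × Option Int)) :
    ((pvPts pairs).foldl pvStep PySem.Dict.empty).keys
    = PySem.Set.ofList ((pvPts pairs).map (fun q => pvKey q.1)) := by
  rw [show (pvStep = fun d x => d.modify (pvKey x.1) PySem.Set.empty ((fun (_ : PySem.Dict (Int × Int) (PySem.Set Int)) (q : Int × Int) => fun s => PySem.Set.add s q.2) d x)) from rfl]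
  rw [PySem.Dict.keys_foldl_modify_key]
  rfl

lemma pv_nodup_keys (pairs : List (Int × Option Int)) :
    ((pvPts pairs).foldl pvStep PySem.Dict.empty).keys.Nodup := by
  exact PySem.Dict.nodup_keys_foldl_modify_key (pvPts pairs) (fun (q : Int × Int) => pvKey q.1)
    PySem.Set.empty (fun (_ : PySem.Dict (Int × Int) (PySem.Set Int)) (q : Int × Int) => fun s => PySem.Set.add s q.2)
    PySem.Dict.empty (by exact List.Pairwise.nil)

-- Python's two-component tuple sort is the sort by the lexicographic key
lemma pv_sorted2_eq {α : Type} (xs : List α) (k1 k2 : α → Int) :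
    PySem.List.sorted2 xs k1 k2 = PySem.List.sorted xs (fun x => toLex (k1 x, k2 x)) := by
  rw [PySem.List.sorted_eq_foldl_insertBy]
  show List.foldl (fun acc x => PySem.List.insertBy
      (fun a b => (decide (k1 a < k1 b) || (!decide (k1 b < k1 a) && decide (k2 a < k2 b)))) x acc) [] xs = _
  congr 1
  funext acc x
  congr 1
  funext a b
  have hiff : (k1 a < k1 b ∨ (¬ k1 b < k1 a ∧ k2 a < k2 b))
      ↔ (toLex (k1 a, k2 a) < toLex (k1 b, k2 b)) := by
    rw [Prod.Lex.lt_iff]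
    simp only [ofLex_toLex]
    omega
  rw [← decide_eq_decide.mpr hiff]
  by_cases h1 : k1 a < k1 b <;> by_cases h2 : k1 b < k1 a <;> by_cases h3 : k2 a < k2 b <;>
    simp [h1, h2, h3]
  infer_instance

-- the cell of an index is a strictly lex-monotone, injective function of the index
lemma pv_key_lt {i j : Int} (h : i < j) : toLex (pvKey i) < toLex (pvKey j) := by
  have hi := PySem.Int.floordiv_mul_add_mod i 9
  have hj := PySem.Int.floordiv_mul_add_mod j 9
  have h1 : 0 ≤ PySem.Int.mod i 9 := PySem.Int.mod_nonneg _ (by norm_num)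
  have h2 : PySem.Int.mod i 9 < 9 := PySem.Int.mod_lt _ (by norm_num)
  have h3 : 0 ≤ PySem.Int.mod j 9 := PySem.Int.mod_nonneg _ (by norm_num)
  have h4 : PySem.Int.mod j 9 < 9 := PySem.Int.mod_lt _ (by norm_num)
  rw [Prod.Lex.lt_iff]
  simp only [pvKey, ofLex_toLex]
  omega

lemma pv_key_inj : Function.Injective pvKey := by
  intro i j hk
  have hi := PySem.Int.floordiv_mul_add_mod i 9
  have hj := PySem.Int.floordiv_mul_add_mod j 9
  simp only [pvKey, Prod.mk.injEq] at hk
  omega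

lemma pv_L_perm (pairs : List (Int × Option Int)) :
    (pvL pairs).Perm (PySem.Set.ofList (pvPts pairs)) := by
  rw [pvL, pv_sorted2_eq]
  exact PySem.List.sorted_perm _ _ _

lemma pv_L_pairwise (pairs : List (Int × Option Int)) :
    (pvL pairs).Pairwise (fun a b => toLex a < toLex b) := by
  have hpw := PySem.List.sorted_pairwise (PySem.Set.ofList (pvPts pairs))
      (fun (q : Int × Int) => toLex (q.1, q.2))
  rw [pvL, pv_sorted2_eq]
  have hnd : (PySem.List.sorted (PySem.Set.ofList (pvPts pairs))
      (fun (q : Int × Int) => toLex (q.1, q.2))).Nodup :=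
    ((PySem.List.sorted_perm _ _ _).nodup_iff).mpr (PySem.Set.nodup_ofList _)
  have := List.Pairwise.and hpw hnd
  exact this.imp (fun {a b} h => by
    rcases h with ⟨hle, hne⟩
    refine lt_of_le_of_ne hle ?_
    simp only [ne_eq, toLex_inj]
    intro hc
    exact hne (by rcases a with ⟨x, y⟩; rcases b with ⟨u, v⟩; simpa using hc))

-- on a list whose first components are nondecreasing, the leading run IS the filter
lemma pv_take_drop (i : Int) (t : List (Int × Int))
    (hmono : (t.map (·.1)).Pairwise (· ≤ ·)) (hge : ∀ q ∈ t, i ≤ q.1) :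
    t.takeWhile (fun q => q.1 == i) = t.filter (fun q => q.1 == i)
    ∧ t.dropWhile (fun q => q.1 == i) = t.filter (fun q => !(q.1 == i)) := by
  induction t with
  | nil => simp
  | cons q t' ih =>
    simp only [List.map_cons, List.pairwise_cons] at hmono
    by_cases h : q.1 = i
    · have hb : (q.1 == i) = true := by simp [h]
      have iht := ih hmono.2 (fun r hr => hge r (List.mem_cons_of_mem _ hr))
      simp [List.dropWhile_cons, List.filter_cons, hb, iht.1, iht.2]
    · have hlt : i < q.1 := lt_of_le_of_ne (hge q (List.mem_cons_self)) (Ne.symm h)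
      have hb : (q.1 == i) = false := by simp [h]
      have hnone : ∀ r ∈ t', ¬ ((r.1 == i) = true) := by
        intro r hr
        have := hmono.1 r.1 (List.mem_map_of_mem hr)
        simp only [beq_iff_eq]
        omega
      constructor
      · simp [hb, List.filter_eq_nil_iff.mpr hnone]
      · simp only [List.dropWhile_cons, hb, Bool.false_eq_true, if_neg, not_false_iff,
          List.filter_cons]
        simp only [Bool.not_false, if_pos]
        congr 1
        exact (List.filter_eq_self.mpr (fun r hr => by simpa using hnone r hr)).symm

-- facts extracted from a lex-sorted cons
lemma pv_cons_facts {i d : Int} {t : List (Int × Int)}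
    (hpw : ((i, d) :: t).Pairwise (fun a b => toLex a < toLex b)) :
    (t.map (·.1)).Pairwise (· ≤ ·) ∧ (∀ q ∈ t, i ≤ q.1)
    ∧ t.Pairwise (fun a b => toLex a < toLex b)
    ∧ (t.dropWhile (fun q => q.1 == i)).Pairwise (fun a b => toLex a < toLex b) := by
  rw [List.pairwise_cons] at hpw
  have htail := hpw.2
  refine ⟨?_, ?_, htail, ?_⟩
  · exact List.pairwise_map.mpr (htail.imp (fun {a b} h => by
      rw [Prod.Lex.lt_iff] at h; simp only [ofLex_toLex] at h; omega))
  · intro q hq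
    have := hpw.1 q hq
    rw [Prod.Lex.lt_iff] at this; simp only [ofLex_toLex] at this; omega
  · exact List.Pairwise.sublist (List.dropWhile_sublist _) htail

lemma pv_firsts_mem (l : List (Int × Int)) (hpw : l.Pairwise (fun a b => toLex a < toLex b)) :
    ∀ j, j ∈ pvFirsts l ↔ j ∈ l.map (·.1) := by
  induction l using pvFirsts.induct with
  | case1 => simp [pvFirsts]
  | case2 i d t ih =>
    intro j
    obtain ⟨hmono, hge, htail, hdrop⟩ := pv_cons_facts hpw
    have iht := ih hdrop j
    rw [pvFirsts]
    simp only [List.mem_cons, List.map_cons, iht]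
    constructor
    · rintro (rfl | h)
      · exact Or.inl rfl
      · rcases List.mem_map.mp h with ⟨q, hq, rfl⟩
        exact Or.inr (List.mem_map_of_mem (List.Sublist.mem hq (List.dropWhile_sublist _)))
    · rintro (rfl | h)
      · exact Or.inl rfl
      · rcases List.mem_map.mp h with ⟨q, hq, rfl⟩
        by_cases hqi : q.1 = i
        · exact Or.inl hqi
        · refine Or.inr (List.mem_map_of_mem ?_)
          rw [(pv_take_drop i t hmono hge).2]
          exact List.mem_filter.mpr ⟨hq, by simp [hqi]⟩

lemma pv_firsts_pairwise (l : List (Int × Int)) (hpw : l.Pairwise (fun a b => toLex a < toLex b)) :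
    (pvFirsts l).Pairwise (· < ·) := by
  induction l using pvFirsts.induct with
  | case1 => simp [pvFirsts]
  | case2 i d t ih =>
    obtain ⟨hmono, hge, htail, hdrop⟩ := pv_cons_facts hpw
    rw [pvFirsts, List.pairwise_cons]
    refine ⟨?_, ih hdrop⟩
    intro j hj
    rw [pv_firsts_mem _ hdrop] at hj
    rcases List.mem_map.mp hj with ⟨q, hq, rfl⟩
    have h1 : i ≤ q.1 := hge q (List.Sublist.mem hq (List.dropWhile_sublist _))
    have h2 : q.1 ≠ i := by
      rw [(pv_take_drop i t hmono hge).2] at hq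
      have := (List.mem_filter.mp hq).2
      simpa using this
    omega

-- the grouping pass over a lex-sorted list, in closed form
lemma pv_altGroup (l : List (Int × Int)) (hpw : l.Pairwise (fun a b => toLex a < toLex b)) :
    altGroup l = (pvFirsts l).map (fun j => pvRender j ((l.filter (fun q => q.1 == j)).map (·.2))) := by
  induction l using altGroup.induct with
  | case1 => simp [altGroup, pvFirsts]
  | case2 i d t ih =>
    obtain ⟨hmono, hge, htail, hdrop⟩ := pv_cons_facts hpw
    rw [altGroup, pvFirsts, List.map_cons]
    congr 1
    · rw [pvRender]
      have hb : ((i, d).1 == i) = true := by simp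
      rw [List.filter_cons, if_pos hb, List.map_cons, List.map_cons]
      rw [(pv_take_drop i t hmono hge).1]
      simp [List.map_map, Function.comp_def]
    · rw [ih hdrop]
      apply List.map_congr_left
      intro j hj
      have hji : j ≠ i := by
        rw [pv_firsts_mem _ hdrop] at hj
        rcases List.mem_map.mp hj with ⟨q, hq, rfl⟩
        rw [(pv_take_drop i t hmono hge).2] at hq
        have := (List.mem_filter.mp hq).2
        simpa using this
      congr 1
      have hsplit : (i, d) :: t = (i, d) :: (t.takeWhile (fun q => q.1 == i) ++ t.dropWhile (fun q => q.1 == i)) := by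
        rw [List.takeWhile_append_dropWhile]
      conv_rhs => rw [hsplit]
      rw [List.filter_cons, List.filter_append]
      have h1 : (((i, d).1 == j)) = false := by simp [Ne.symm hji]
      rw [if_neg (by simp [h1])]
      have h2 : (t.takeWhile (fun q => q.1 == i)).filter (fun q => q.1 == j) = [] := by
        apply List.filter_eq_nil_iff.mpr
        intro q hq
        have : q.1 = i := by
          have := List.mem_takeWhile_imp hq
          simpa using this
        simp [this, Ne.symm hji]
      rw [h2, List.nil_append]

-- building a set commutes with filtering
lemma pv_filter_add (p : Int × Int → Bool) (s : PySem.Set (Int × Int)) (x : Int × Int) :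
    (PySem.Set.add s x).filter p = if p x then PySem.Set.add (s.filter p) x else s.filter p := by
  unfold PySem.Set.add PySem.Set.contains
  by_cases hc : x ∈ s
  · rw [if_pos (List.contains_iff_mem.mpr hc)]
    by_cases hp : p x
    · rw [if_pos hp]
      have hmem : x ∈ s.filter p := List.mem_filter.mpr ⟨hc, hp⟩
      rw [if_pos (List.contains_iff_mem.mpr hmem)]
    · rw [if_neg hp]
  · rw [if_neg (by simp only [List.contains_iff_mem]; exact hc)]
    rw [List.filter_append]
    by_cases hp : p x
    · rw [if_pos hp]
      have hnmem : ¬ x ∈ s.filter p := fun h => hc (List.mem_filter.mp h).1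
      rw [if_neg (by simp only [List.contains_iff_mem]; exact hnmem)]
      simp [hp]
    · rw [if_neg hp]
      simp [hp]

lemma pv_ofList_filter_gen (p : Int × Int → Bool) (xs : List (Int × Int)) (s : PySem.Set (Int × Int)) :
    (xs.foldl PySem.Set.add s).filter p = (xs.filter p).foldl PySem.Set.add (s.filter p) := by
  induction xs generalizing s with
  | nil => simp
  | cons x t ih =>
    rw [List.foldl_cons, ih, List.filter_cons]
    by_cases hp : p x
    · rw [if_pos hp, List.foldl_cons, pv_filter_add, if_pos hp]
    · rw [if_neg hp, pv_filter_add, if_neg hp]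

-- dedup commutes with filter
lemma pv_ofList_filter (p : Int × Int → Bool) (xs : List (Int × Int)) :
    PySem.Set.ofList (xs.filter p) = (PySem.Set.ofList xs).filter p := by
  rw [PySem.Set.ofList, PySem.Set.ofList, pv_ofList_filter_gen]
  rfl

lemma pv_map_snd_add (j : Int) (s : PySem.Set (Int × Int)) (x : Int × Int)
    (hs : ∀ q ∈ s, q.1 = j) (hx : x.1 = j) :
    (PySem.Set.add s x).map (·.2) = PySem.Set.add (s.map (·.2)) x.2 := by
  unfold PySem.Set.add PySem.Set.contains
  by_cases hc : x ∈ s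
  · rw [if_pos (List.contains_iff_mem.mpr hc)]
    have : x.2 ∈ s.map (·.2) := List.mem_map_of_mem hc
    rw [if_pos (List.contains_iff_mem.mpr this)]
  · rw [if_neg (by simp only [List.contains_iff_mem]; exact hc)]
    have : ¬ x.2 ∈ s.map (·.2) := by
      intro h
      rcases List.mem_map.mp h with ⟨q, hq, hq2⟩
      have : q = x := by
        rcases q with ⟨a, b⟩; rcases x with ⟨c, e⟩
        have := hs _ hq
        simp_all
      exact hc (this ▸ hq)
    rw [if_neg (by simp only [List.contains_iff_mem]; exact this)]
    simp

lemma pv_ofList_map_snd_gen (j : Int) (xs : List (Int × Int)) (s : PySem.Set (Int × Int))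
    (hs : ∀ q ∈ s, q.1 = j) (hx : ∀ q ∈ xs, q.1 = j) :
    (xs.foldl PySem.Set.add s).map (·.2) = (xs.map (·.2)).foldl PySem.Set.add (s.map (·.2)) := by
  induction xs generalizing s with
  | nil => simp
  | cons x t ih =>
    rw [List.foldl_cons, List.map_cons, List.foldl_cons]
    rw [ih _ (fun q hq => by
        rcases (PySem.Set.mem_add s x q).mp hq with h | h
        · exact hs q h
        · exact h ▸ hx x List.mem_cons_self)
      (fun q hq => hx q (List.mem_cons_of_mem _ hq))]
    rw [pv_map_snd_add j s x hs (hx x List.mem_cons_self)]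

-- dedup commutes with the second projection on a constant-first list
lemma pv_ofList_map_snd (j : Int) (xs : List (Int × Int)) (hx : ∀ q ∈ xs, q.1 = j) :
    PySem.Set.ofList (xs.map (·.2)) = (PySem.Set.ofList xs).map (·.2) := by
  rw [PySem.Set.ofList, PySem.Set.ofList,
    pv_ofList_map_snd_gen j xs PySem.Set.empty (by simp [PySem.Set.empty]) hx]
  rfl

-- A's per-cell sorted digit set = B's group digits
lemma pv_digits (pairs : List (Int × Option Int)) (j : Int) :
    PySem.List.sorted
      (PySem.Set.ofList (((pvPts pairs).filter (fun q => pvKey q.1 == pvKey j)).map (·.2)))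
      (fun x => x)
    = ((pvL pairs).filter (fun q => q.1 == j)).map (·.2) := by
  have hcongr : (pvPts pairs).filter (fun q => pvKey q.1 == pvKey j)
      = (pvPts pairs).filter (fun q => q.1 == j) := by
    apply List.filter_congr
    intro q _
    by_cases h : q.1 = j
    · simp [h]
    · have : pvKey q.1 ≠ pvKey j := fun hc => h (pv_key_inj hc)
      simp [h, this]
  rw [hcongr]
  rw [pv_ofList_map_snd j _ (fun q hq => by simpa using (List.mem_filter.mp hq).2)]
  rw [pv_ofList_filter]
  apply PySem.List.sorted_eq_of_perm_of_pairwise_lt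
  · exact ((pv_L_perm pairs).filter _).map _
  · have hpw : ((pvL pairs).filter (fun q => q.1 == j)).Pairwise (fun a b => toLex a < toLex b) :=
      List.Pairwise.sublist List.filter_sublist (pv_L_pairwise pairs)
    have : ((pvL pairs).filter (fun q => q.1 == j)).Pairwise (fun a b => a.2 < b.2) := by
      refine hpw.imp_of_mem ?_
      intro a b ha hb hlt
      have ha1 : a.1 = j := by simpa using (List.mem_filter.mp ha).2
      have hb1 : b.1 = j := by simpa using (List.mem_filter.mp hb).2
      rw [Prod.Lex.lt_iff] at hlt
      simp only [ofLex_toLex] at hlt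
      omega
    exact List.pairwise_map.mpr this

lemma pv_join_nil (sep : String) : PySem.Str.join sep [] = "" := by
  show String.ofList (PySem.Chars.join sep.toList []) = ""
  rw [PySem.Chars.join_nil]

lemma pv_foldl_append (l : List String) (a : String) :
    l.foldl (· ++ ·) a = a ++ l.foldl (· ++ ·) "" := by
  induction l generalizing a with
  | nil => simp [String.append_empty]
  | cons s t ih =>
    simp only [List.foldl_cons]
    rw [ih ("" ++ s), ih (a ++ s), String.empty_append, String.append_assoc]

-- Python's "".join is the += loop
lemma pv_join_empty (l : List String) : PySem.Str.join "" l = l.foldl (· ++ ·) "" := by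
  induction l with
  | nil => exact pv_join_nil ""
  | cons s t ih =>
    have hstep : PySem.Str.join "" (s :: t) = s ++ PySem.Str.join "" t := by
      cases t with
      | nil =>
        show String.ofList (PySem.Chars.join _ [s.toList]) = _
        rw [PySem.Chars.join_singleton, String.ofList_toList]
        show s = s ++ PySem.Str.join "" []
        rw [pv_join_nil, String.append_empty]
      | cons u t' =>
        show String.ofList (PySem.Chars.join _ (s.toList :: u.toList :: _)) = _
        rw [PySem.Chars.join_cons_cons]
        rw [String.ofList_append, String.ofList_append, String.ofList_toList]
        show s ++ String.ofList "".toList ++ _ = _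
        rw [String.ofList_toList, String.append_empty]
        rfl
    rw [hstep, ih, List.foldl_cons, String.empty_append, pv_foldl_append t s]

-- A's sorted item list, in closed form
lemma pv_items_sorted (pairs : List (Int × Option Int)) :
    PySem.List.sorted2 ((pvPts pairs).foldl pvStep PySem.Dict.empty).items
      (fun x => x.1.1) (fun x => x.1.2)
    = (pvFirsts (pvL pairs)).map
        (fun j => (pvKey j, ((pvPts pairs).foldl pvStep PySem.Dict.empty).getD (pvKey j) PySem.Set.empty)) := by
  set D := (pvPts pairs).foldl pvStep PySem.Dict.empty with hD
  rw [pv_sorted2_eq]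
  apply PySem.List.sorted_eq_of_perm_of_pairwise_lt
  · rw [PySem.Dict.items_eq_map_keys D (pv_nodup_keys pairs) PySem.Set.empty, pv_keys]
    have h1 : ((pvFirsts (pvL pairs)).map pvKey).Perm
        (PySem.Set.ofList ((pvPts pairs).map (fun q => pvKey q.1))) := by
      rw [List.perm_ext_iff_of_nodup]
      · intro k
        simp only [List.mem_map, PySem.Set.mem_ofList]
        constructor
        · rintro ⟨j, hj, rfl⟩
          rw [pv_firsts_mem _ (pv_L_pairwise pairs)] at hj
          rcases List.mem_map.mp hj with ⟨q, hq, rfl⟩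
          have : q ∈ pvPts pairs := (PySem.Set.mem_ofList _ _).mp ((pv_L_perm pairs).subset hq)
          exact ⟨q, this, rfl⟩
        · rintro ⟨q, hq, rfl⟩
          refine ⟨q.1, ?_, rfl⟩
          rw [pv_firsts_mem _ (pv_L_pairwise pairs)]
          exact List.mem_map_of_mem ((pv_L_perm pairs).mem_iff.mpr ((PySem.Set.mem_ofList _ _).mpr hq))
      · exact List.Nodup.map pv_key_inj
          ((pv_firsts_pairwise _ (pv_L_pairwise pairs)).imp (fun h => ne_of_lt h))
      · exact PySem.Set.nodup_ofList _
    have := h1.map (fun k => (k, D.getD k PySem.Set.empty))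
    rw [List.map_map] at this
    exact this
  · have h := pv_firsts_pairwise _ (pv_L_pairwise pairs)
    rw [List.pairwise_map]
    exact h.imp (fun hlt => pv_key_lt hlt)

lemma pv_main (pairs : List (Int × Option Int)) : fmt_elims pairs = fmt_elims_alt pairs := by
  unfold fmt_elims fmt_elims_alt
  simp only [pv_fold_eq, pv_items_sorted, List.map_map]
  rw [show (PySem.List.sorted2
      (PySem.Set.ofList (pairs.filterMap (fun p => p.2.map (fun d => (p.1, d)))))
      (fun (q : Int × Int) => q.1) (fun q => q.2)) = pvL pairs from rfl]
  rw [pv_altGroup _ (pv_L_pairwise pairs)]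
  have hmap : ∀ j ∈ pvFirsts (pvL pairs),
      ((fun it : (Int × Int) × PySem.Set Int =>
          "r" ++ PySem.Int.toStr it.1.1 ++ "c" ++ PySem.Int.toStr it.1.2 ++ "<>"
            ++ PySem.Str.join "" ((PySem.List.sorted it.2 (fun x => x)).map PySem.Int.toStr)) ∘
        (fun j => (pvKey j, ((pvPts pairs).foldl pvStep PySem.Dict.empty).getD (pvKey j) PySem.Set.empty))) j
      = pvRender j (((pvL pairs).filter (fun q => q.1 == j)).map (·.2)) := by
    intro j _
    simp only [Function.comp_apply, pv_getD, pv_digits, pv_join_empty, List.map_map]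
    simp [pvRender, pvKey]
  rw [List.map_congr_left hmap]
  by_cases h : (pvFirsts (pvL pairs)).map (fun j => pvRender j (((pvL pairs).filter (fun q => q.1 == j)).map (·.2))) = []
  · rw [if_pos h, h, pv_join_nil]
  · rw [if_neg h]

-- ===== VERDICT (by name: the statement is the Claim_ definition above) =====
theorem fmt_elims_spec : Claim_equal_fmt_elims := by
  intro pairs _
  exact pv_main pairs
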